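-- pv_equiv track=rewrite | github.com/professorAzharJamal/tutorials | AI/session 5/propoTheorm2.py | prove_theorem
-- ===== SOURCE A (Python) =====
-- def negate(proposition):
--   """Negates a proposition."""
--   return f"not ({proposition})"
--
-- def implication(premise1, premise2):
--   """Creates an implication statement."""
--   return f"{premise1} implies {premise2}"
--
-- def apply_modus_ponens(premise1, premise2):
--   """Checks if the conclusion follows from the premises using modus ponens."""
--   conclusion = implication(premise1, premise2)
--   # Premise 1 and negation of premise 2 lead to a contradiction (always False)
--   return [premise1, negate(premise2)], conclusion
--
-- def prove_theorem(premises, conclusion):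
--   """Attempts to prove the conclusion from the premises using modus ponens."""
--   # Convert premises and conclusion to a list of statements
--   statements = premises + [conclusion]
--   for i in range(len(statements)):
--     for j in range(i + 1, len(statements)):
--       # Try applying modus ponens with each pair of premises
--       inferred, inferred_conclusion = apply_modus_ponens(statements[i], statements[j])
--       if inferred_conclusion == conclusion:  # Conclusion matches the desired outcome
--         return True
--   return False
-- ===== SOURCE B (Python) =====
-- def prove_theorem(premises, conclusion):
--   """Single pass with a hash set: for each statement s, the only left-hand side p
--   with p + " implies " + s == conclusion is a fixed prefix of conclusion, so check
--   membership of that prefix among previously seen statements."""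
--   sep = " implies "
--   statements = premises + [conclusion]
--   seen = set()
--   for s in statements:
--     suffix = sep + s
--     if conclusion.endswith(suffix):
--       p = conclusion[: len(conclusion) - len(suffix)]
--       if p in seen:
--         return True
--     seen.add(s)
--   return False
-- ===== Notes on version B (the rewrite author's own statement) =====
-- stated objective: faster
-- what changed: Replaces the quadratic all-pairs scan with a single pass that, for each statement, checks whether the conclusion ends with ' implies '+statement and whether the uniquely determined left-hand prefix was already seen in a hash set.
import Mathlib
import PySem

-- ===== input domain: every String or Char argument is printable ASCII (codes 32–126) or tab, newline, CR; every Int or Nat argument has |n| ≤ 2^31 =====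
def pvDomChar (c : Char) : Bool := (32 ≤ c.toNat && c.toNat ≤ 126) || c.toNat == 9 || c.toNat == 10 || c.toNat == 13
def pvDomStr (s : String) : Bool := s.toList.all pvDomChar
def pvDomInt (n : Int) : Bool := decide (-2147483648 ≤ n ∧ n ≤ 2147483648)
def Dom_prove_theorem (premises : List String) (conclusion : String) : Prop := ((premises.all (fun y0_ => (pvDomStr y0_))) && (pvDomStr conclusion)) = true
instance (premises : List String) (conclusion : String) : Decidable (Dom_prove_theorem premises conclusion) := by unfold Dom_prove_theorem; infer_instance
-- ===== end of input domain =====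

-- B replaces A's all-pairs scan with one pass over the statements and a set of
-- already-seen statements (objective: faster). Both ports compare code-point lists
-- (String.toList), which is exact for Python string equality/endswith/slicing.

-- ===== PORT A =====
-- ' implies ' — the separator glued in by implication(premise1, premise2)
def pvSep : List Char := " implies ".toList

-- implication(premise1, premise2) = f"{premise1} implies {premise2}"
def pvImplication (p1 p2 : List Char) : List Char := p1 ++ pvSep ++ p2

-- A: statements = premises + [conclusion]; for i in range(n): for j in range(i+1, n):
--    if implication(statements[i], statements[j]) == conclusion: return True; return False
def prove_theorem (premises : List String) (conclusion : String) : Bool :=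
  let statements : List (List Char) := (premises ++ [conclusion]).map String.toList
  (PySem.List.pyRange 0 (statements.length : Int) 1).any (fun i =>
    (PySem.List.pyRange (i + 1) (statements.length : Int) 1).any (fun j =>
      pvImplication (PySem.List.pyGetD statements i []) (PySem.List.pyGetD statements j [])
        == conclusion.toList))

-- ===== PORT B =====
-- the loop of Source B: for s in statements: suffix = sep + s;
--   if conclusion.endswith(suffix): p = conclusion[:len(conclusion)-len(suffix)];
--     if p in seen: return True
--   seen.add(s)
def pvAltGo (concl : List Char) : List (List Char) → PySem.Set (List Char) → Bool
  | [], _ => false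
  | s :: rest, seen =>
    let suffix := pvSep ++ s
    if PySem.Chars.endswith concl suffix then
      let p := PySem.Chars.slice concl none (some ((concl.length : Int) - (suffix.length : Int)))
      if PySem.Set.contains seen p then true
      else pvAltGo concl rest (PySem.Set.add seen s)
    else pvAltGo concl rest (PySem.Set.add seen s)

def prove_theorem_alt (premises : List String) (conclusion : String) : Bool :=
  let statements : List (List Char) := (premises ++ [conclusion]).map String.toList
  pvAltGo conclusion.toList statements PySem.Set.empty

-- ===== PRECONDITION & SPEC =====
def Spec_prove_theorem (premises : List String) (conclusion : String) (out : Bool) : Prop := out = prove_theorem_alt premises conclusion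
instance (premises : List String) (conclusion : String) (out : Bool) : Decidable (Spec_prove_theorem premises conclusion out) := by unfold Spec_prove_theorem; infer_instance

-- ===== CLAIM (what is proved, stated in full; the proofs are below) =====
def Claim_equal_prove_theorem : Prop := ∀ (premises : List String) (conclusion : String), Dom_prove_theorem premises conclusion → Spec_prove_theorem premises conclusion (prove_theorem premises conclusion)

-- ===== LEMMAS AND PROOFS =====

-- The common specification: two statements, in order, glue with ' implies ' to concl.
def pvPair (concl : List Char) (l : List (List Char)) : Prop :=
  ∃ i j : Nat, i < j ∧ j < l.length ∧ l.getD i [] ++ pvSep ++ l.getD j [] = concl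

-- A's nested loop decides pvPair
theorem pvA_iff (concl : List Char) (l : List (List Char)) :
    ((PySem.List.pyRange 0 (l.length : Int) 1).any (fun i =>
      (PySem.List.pyRange (i + 1) (l.length : Int) 1).any (fun j =>
        pvImplication (PySem.List.pyGetD l i []) (PySem.List.pyGetD l j []) == concl)) = true)
      ↔ pvPair concl l := by
  simp only [List.any_eq_true, PySem.List.mem_pyRange_one, beq_iff_eq, pvImplication, pvPair]
  constructor
  · rintro ⟨i, ⟨hi0, hin⟩, j, ⟨hji, hjn⟩, he⟩
    refine ⟨i.toNat, j.toNat, by omega, by omega, ?_⟩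
    rw [PySem.List.pyGetD_of_nonneg _ _ hi0, PySem.List.pyGetD_of_nonneg _ _ (by omega)] at he
    exact he
  · rintro ⟨i, j, hij, hjn, he⟩
    refine ⟨(i : Int), ⟨by omega, by omega⟩, (j : Int), ⟨by omega, by omega⟩, ?_⟩
    rw [PySem.List.pyGetD_of_nonneg _ _ (by omega), PySem.List.pyGetD_of_nonneg _ _ (by omega)]
    simpa using he

-- B's per-step test: endswith + prefix-in-seen ↔ some p in seen with p ++ suffix = concl
theorem pvCond_iff (concl suffix : List Char) (X : List (List Char)) :
    (PySem.Chars.endswith concl suffix = true ∧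
      PySem.Chars.slice concl none (some ((concl.length : Int) - (suffix.length : Int))) ∈ X)
      ↔ ∃ p ∈ X, p ++ suffix = concl := by
  constructor
  · rintro ⟨hend, hmem⟩
    rw [PySem.Chars.endswith_iff] at hend
    obtain ⟨p0, hp0⟩ := hend
    refine ⟨p0, ?_, hp0⟩
    have hlen : suffix.length ≤ concl.length := by
      rw [← hp0]; simp
    have hb : ((concl.length : Int) - (suffix.length : Int)) = ((concl.length - suffix.length : Nat) : Int) := by
      omega
    rw [hb, PySem.Chars.slice_eq_listSlice, PySem.List.slice_to] at hmem
    · have hplen : p0.length = concl.length - suffix.length := by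
        rw [← hp0]; simp
      rw [← hp0] at hmem
      simpa [hplen.symm, List.take_left] using hmem
    · positivity
  · rintro ⟨p, hpX, hp⟩
    have hend : suffix <:+ concl := ⟨p, hp⟩
    constructor
    · rw [PySem.Chars.endswith_iff]; exact hend
    · have hb : ((concl.length : Int) - (suffix.length : Int)) = ((concl.length - suffix.length : Nat) : Int) := by
        have : suffix.length ≤ concl.length := by rw [← hp]; simp
        omega
      rw [hb, PySem.Chars.slice_eq_listSlice, PySem.List.slice_to]
      · have hplen : p.length = concl.length - suffix.length := by rw [← hp]; simp
        rw [← hp]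
        simpa [hplen.symm, List.take_left] using hpX
      · positivity

theorem pvAltGo_cons_iff (concl s : List Char) (rest : List (List Char)) (seen : PySem.Set (List Char)) :
    pvAltGo concl (s :: rest) seen = true ↔
      ((∃ p ∈ seen, p ++ (pvSep ++ s) = concl) ∨ pvAltGo concl rest (PySem.Set.add seen s) = true) := by
  rw [pvAltGo]
  by_cases hend : PySem.Chars.endswith concl (pvSep ++ s) = true
  · by_cases hc : PySem.Set.contains seen
        (PySem.Chars.slice concl none (some ((concl.length : Int) - ((pvSep ++ s).length : Int)))) = true
    · simp only [hend, hc, if_true]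
      constructor
      · intro _
        left
        exact (pvCond_iff concl (pvSep ++ s) seen).mp ⟨hend, (PySem.Set.contains_iff _ _).mp hc⟩
      · intro _; trivial
    · simp only [hend, hc, if_true, if_false, Bool.false_eq_true]
      constructor
      · intro h; right; exact h
      · rintro (⟨p, hp, he⟩ | h)
        · exfalso; apply hc
          exact (PySem.Set.contains_iff _ _).mpr
            ((pvCond_iff concl (pvSep ++ s) seen).mpr ⟨p, hp, he⟩).2
        · exact h
  · simp only [hend, if_false, Bool.false_eq_true]
    constructor
    · intro h; right; exact h
    · rintro (⟨p, hp, he⟩ | h)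
      · exact absurd ((pvCond_iff concl (pvSep ++ s) seen).mpr ⟨p, hp, he⟩).1 hend
      · exact h

-- B's loop invariant: seen holds the statements already passed
theorem pvAltGo_iff (concl : List Char) (l : List (List Char)) (seen : PySem.Set (List Char)) :
    pvAltGo concl l seen = true ↔
      ∃ j : Nat, j < l.length ∧ ∃ p,
        (p ∈ seen ∨ ∃ i : Nat, i < j ∧ l.getD i [] = p) ∧ p ++ pvSep ++ l.getD j [] = concl := by
  induction l generalizing seen with
  | nil => simp [pvAltGo]
  | cons s rest ih =>
    rw [pvAltGo_cons_iff, ih]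
    constructor
    · rintro (⟨p, hp, he⟩ | ⟨j, hj, p, hp, he⟩)
      · exact ⟨0, by simp, p, Or.inl hp, by simpa using he⟩
      · refine ⟨j + 1, by simpa using Nat.succ_lt_succ hj, p, ?_, by simpa using he⟩
        rcases hp with hp | ⟨i, hi, hgi⟩
        · rcases (PySem.Set.mem_add _ _ _).mp hp with hp | hp
          · exact Or.inl hp
          · exact Or.inr ⟨0, by omega, by simpa using hp.symm⟩
        · exact Or.inr ⟨i + 1, by omega, by simpa using hgi⟩
    · rintro ⟨j, hj, p, hp, he⟩
      cases j with
      | zero =>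
        rcases hp with hp | ⟨i, hi, _⟩
        · left; exact ⟨p, hp, by simpa using he⟩
        · omega
      | succ j' =>
        right
        refine ⟨j', by simpa using Nat.lt_of_succ_lt_succ hj, p, ?_, by simpa using he⟩
        rcases hp with hp | ⟨i, hi, hgi⟩
        · exact Or.inl ((PySem.Set.mem_add _ _ _).mpr (Or.inl hp))
        · cases i with
          | zero => exact Or.inl ((PySem.Set.mem_add _ _ _).mpr (Or.inr (by simpa using hgi.symm)))
          | succ i' => exact Or.inr ⟨i', by omega, by simpa using hgi⟩

-- B started with an empty seen-set decides pvPair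
theorem pvB_iff (concl : List Char) (l : List (List Char)) :
    pvAltGo concl l PySem.Set.empty = true ↔ pvPair concl l := by
  rw [pvAltGo_iff]
  unfold pvPair
  constructor
  · rintro ⟨j, hj, p, hp, he⟩
    rcases hp with hp | ⟨i, hi, hgi⟩
    · exact absurd hp (by simp [PySem.Set.empty])
    · exact ⟨i, j, hi, hj, by rw [hgi]; exact he⟩
  · rintro ⟨i, j, hij, hjn, he⟩
    exact ⟨j, hjn, l.getD i [], Or.inr ⟨i, hij, rfl⟩, he⟩

-- ===== VERDICT (by name: the statement is the Claim_ definition above) =====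
theorem prove_theorem_spec : Claim_equal_prove_theorem := by
  intro premises conclusion _
  unfold Spec_prove_theorem prove_theorem prove_theorem_alt
  rw [Bool.eq_iff_iff, pvA_iff, pvB_iff]
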